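-- pv_equiv track=rewrite | github.com/Simon-Zeller/DesignOps-Agentic-Framework | src/daf/tools/dependency_chain_walker.py | _find_root_cause
-- ===== SOURCE A (Python) =====
-- from typing import Any
--
-- def _find_root_cause(
--     component: str,
--     graph: dict[str, Any],
--     failure_set: set[str],
--     visited: set[str],
-- ) -> str:
--     """Recursively find the root-cause ancestor in the failure set."""
--     if component in visited:
--         return component
--     visited.add(component)
--     deps = graph.get(component, {}).get("dependencies", [])
--     failing_deps = [d for d in deps if d in failure_set]
--     if not failing_deps:
--         return component
--     return _find_root_cause(failing_deps[0], graph, failure_set, visited)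
-- ===== SOURCE B (Python) =====
-- def _find_root_cause(component, graph, failure_set, visited):
--     """Precompute each node's first failing dependency once, then walk that successor map."""
--     step = {
--         node: next((d for d in info.get("dependencies", []) if d in failure_set), None)
--         for node, info in graph.items()
--     }
--     while component not in visited:
--         visited.add(component)
--         nxt = step.get(component)
--         if nxt is None:
--             return component
--         component = nxt
--     return component
-- ===== Notes on version B (the rewrite author's own statement) =====
-- stated objective: alternative
-- what changed: Instead of re-fetching and filtering each node's dependency list at every recursive step, B precomputes a successor map (node -> first failing dependency, built once from graph.items()) and then walks that map with a plain while-loop until a node with no failing dependency or an already-visited node is reached.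
import Mathlib
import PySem

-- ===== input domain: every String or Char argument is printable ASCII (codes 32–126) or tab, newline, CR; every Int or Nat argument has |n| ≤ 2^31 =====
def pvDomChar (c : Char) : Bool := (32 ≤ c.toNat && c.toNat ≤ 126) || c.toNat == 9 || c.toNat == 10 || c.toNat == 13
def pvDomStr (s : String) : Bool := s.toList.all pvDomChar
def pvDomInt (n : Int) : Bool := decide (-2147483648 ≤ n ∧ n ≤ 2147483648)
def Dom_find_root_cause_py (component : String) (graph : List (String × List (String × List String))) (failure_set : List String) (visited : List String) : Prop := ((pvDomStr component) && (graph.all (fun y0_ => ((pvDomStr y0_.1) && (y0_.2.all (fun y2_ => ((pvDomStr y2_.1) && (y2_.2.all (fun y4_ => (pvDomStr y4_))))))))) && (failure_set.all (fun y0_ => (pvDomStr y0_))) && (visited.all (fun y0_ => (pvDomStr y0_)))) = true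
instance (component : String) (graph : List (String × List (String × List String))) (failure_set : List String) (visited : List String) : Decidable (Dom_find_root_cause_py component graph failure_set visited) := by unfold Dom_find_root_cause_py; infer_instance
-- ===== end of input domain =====

-- ===== PORT A =====
-- B precomputes a successor map (node -> first failing dependency) once and walks it;
-- A refilters the dependency list at each recursive step. Return value only: in Python both
-- mutate `visited` identically. Fuel (failure_set.length + 1) is a totality device only:
-- every step moves to a failure_set member newly added to visited, so it never runs out.
def frcA (graph : List (String × List (String × List String))) (failure_set : List String) : Nat → String → PySem.Set String → String
  | 0, component, _ => component
  | fuel + 1, component, visited =>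
    if visited.contains component then component
    else
      let visited' := PySem.Set.add visited component
      let node : List (String × List String) := PySem.Dict.getD ⟨graph⟩ component []
      let deps := PySem.Dict.getD ⟨node⟩ "dependencies" []
      let failing_deps := deps.filter (fun d => failure_set.contains d)
      match failing_deps with
      | [] => component
      | d :: _ => frcA graph failure_set fuel d visited'

def find_root_cause_py (component : String) (graph : List (String × List (String × List String))) (failure_set : List String) (visited : List String) : String :=
  frcA graph failure_set (failure_set.length + 1) component (PySem.Set.ofList visited)

-- ===== PORT B =====
-- The dict comprehension over graph.items(): each node is mapped to its first failing
-- dependency (next(..., None)); on the assoc-list representation of a Python dict (unique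
-- keys) this is a map over the entries.
def mkStep (graph : List (String × List (String × List String))) (failure_set : List String) : PySem.Dict String (Option String) :=
  ⟨graph.map (fun e =>
    (e.1, (PySem.Dict.getD ⟨e.2⟩ "dependencies" []).find? (fun d => failure_set.contains d)))⟩

-- B's while-loop: look up the successor map, stop on a visited node or a `none` step.
def walkStep (step : PySem.Dict String (Option String)) : Nat → String → PySem.Set String → String
  | 0, component, _ => component
  | fuel + 1, component, visited =>
    if visited.contains component then component
    else
      match PySem.Dict.getD step component none with
      | none => component
      | some nxt => walkStep step fuel nxt (PySem.Set.add visited component)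

def find_root_cause_py_alt (component : String) (graph : List (String × List (String × List String))) (failure_set : List String) (visited : List String) : String :=
  walkStep (mkStep graph failure_set) (failure_set.length + 1) component (PySem.Set.ofList visited)

-- ===== PRECONDITION & SPEC =====
def Spec_find_root_cause_py (component : String) (graph : List (String × List (String × List String))) (failure_set : List String) (visited : List String) (out : String) : Prop := out = find_root_cause_py_alt component graph failure_set visited
instance (component : String) (graph : List (String × List (String × List String))) (failure_set : List String) (visited : List String) (out : String) : Decidable (Spec_find_root_cause_py component graph failure_set visited out) := by unfold Spec_find_root_cause_py; infer_instance

-- ===== CLAIM (what is proved, stated in full; the proofs are below) =====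
def Claim_equal_find_root_cause_py : Prop := ∀ (component : String) (graph : List (String × List (String × List String))) (failure_set : List String) (visited : List String), Dom_find_root_cause_py component graph failure_set visited → Spec_find_root_cause_py component graph failure_set visited (find_root_cause_py component graph failure_set visited)

-- ===== LEMMAS AND PROOFS =====
theorem step_lookup (graph : List (String × List (String × List String))) (failure_set : List String) (c : String) :
    PySem.Dict.getD (mkStep graph failure_set) c none =
      (PySem.Dict.getD ⟨PySem.Dict.getD ⟨graph⟩ c []⟩ "dependencies" []).find?
        (fun d => failure_set.contains d) := by
  induction graph with
  | nil => rfl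
  | cons e t ih =>
    by_cases h : e.1 = c
    · simp [mkStep, PySem.Dict.getD, PySem.Dict.get?, h]
    · simpa [mkStep, PySem.Dict.getD, PySem.Dict.get?, h] using ih

theorem find?_eq_head?_filter {α : Type} (p : α → Bool) (l : List α) :
    l.find? p = (l.filter p).head? := by
  induction l with
  | nil => rfl
  | cons a t ih =>
    cases h : p a with
    | true => simp [h]
    | false => rw [List.find?_cons_of_neg (by simp [h]), List.filter_cons_of_neg (by simp [h])]; exact ih

theorem frcA_eq_walkStep (graph : List (String × List (String × List String))) (failure_set : List String) (fuel : Nat) :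
    ∀ (component : String) (visited : PySem.Set String),
      frcA graph failure_set fuel component visited =
        walkStep (mkStep graph failure_set) fuel component visited := by
  induction fuel with
  | zero => intro c v; rfl
  | succ n ih =>
    intro c v
    simp only [frcA, walkStep, step_lookup, find?_eq_head?_filter]
    split
    · rfl
    · cases (PySem.Dict.getD ⟨PySem.Dict.getD ⟨graph⟩ c []⟩ "dependencies" []).filter
          (fun d => failure_set.contains d) with
      | nil => rfl
      | cons d _ => exact ih d _

-- ===== VERDICT (by name: the statement is the Claim_ definition above) =====
theorem find_root_cause_py_spec : Claim_equal_find_root_cause_py := by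
  intro component graph failure_set visited _
  unfold Spec_find_root_cause_py find_root_cause_py find_root_cause_py_alt
  exact frcA_eq_walkStep graph failure_set _ component _
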